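-- pv_equiv track=rewrite | github.com/Non2d/dsv-sub-modules | macro-structual-features/features/rally.py | filter_rally
-- ===== SOURCE A (Python) =====
-- def filter_rally(arrays_list):
--     """Filter rally duplicates"""
--     if not arrays_list:
--         return []
--
--     rev = list(reversed(arrays_list))
--     result = rev[0]  # 最長ターンは確定で採用
--     for i in range(1, len(arrays_list)):
--         for rally in rev[i]:
--             if not any(all(item in condition for item in rally) for condition in result):
--                 result.append(rally)
--     return result
-- ===== SOURCE B (Python) =====
-- def filter_rally(arrays_list):
--     """Filter rally duplicates via an inverted index (item -> ids of accepted
--     rallies containing it): a rally is a subset of some accepted rally iff the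
--     intersection of its items' posting sets is non-empty, so the scan over all
--     accepted rallies disappears.  Unlike A, this does not mutate arrays_list[-1]
--     in place; the return value is identical."""
--     if not arrays_list:
--         return []
--     result = list(arrays_list[-1])
--     postings = {}
--     n = 0
--     for cond in result:
--         for item in cond:
--             postings.setdefault(item, set()).add(n)
--         n += 1
--     for group in reversed(arrays_list[:-1]):
--         for rally in group:
--             if not _covered(rally, postings, n):
--                 result.append(rally)
--                 for item in rally:
--                     postings.setdefault(item, set()).add(n)
--                 n += 1
--     return result
--
--
-- def _covered(rally, postings, n):
--     if not rally:
--         return n > 0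
--     ids = postings.get(rally[0], set())
--     for item in rally[1:]:
--         if not ids:
--             return False
--         ids = ids & postings.get(item, set())
--     return bool(ids)
-- ===== Notes on version B (the rewrite author's own statement) =====
-- stated objective: faster
-- what changed: Replaces A's inner scan over all accepted rallies with list-membership subset tests by an incrementally maintained inverted index (item -> set of accepted-rally ids) whose posting sets are intersected per rally item.
import Mathlib
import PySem

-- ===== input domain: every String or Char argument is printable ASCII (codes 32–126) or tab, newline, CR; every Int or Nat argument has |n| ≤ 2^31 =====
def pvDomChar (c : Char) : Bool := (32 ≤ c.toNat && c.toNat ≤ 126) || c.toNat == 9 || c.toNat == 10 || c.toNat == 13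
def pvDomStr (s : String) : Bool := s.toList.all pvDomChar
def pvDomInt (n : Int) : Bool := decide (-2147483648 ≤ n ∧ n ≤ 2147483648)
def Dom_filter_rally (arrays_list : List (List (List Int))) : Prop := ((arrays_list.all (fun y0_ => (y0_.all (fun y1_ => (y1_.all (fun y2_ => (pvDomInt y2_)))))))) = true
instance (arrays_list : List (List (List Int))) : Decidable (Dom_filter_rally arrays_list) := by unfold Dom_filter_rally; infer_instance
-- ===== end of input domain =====

-- B replaces A's scan over all accepted rallies (subset test by list membership) with an
-- inverted index item -> set of accepted-rally ids; A mutates arrays_list[-1] in place, B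
-- does not (the equivalence proved is about the return value).

-- ===== PORT A =====
def filter_rally (arrays_list : List (List (List Int))) : List (List Int) :=
  if arrays_list = [] then []
  else
    let rev := arrays_list.reverse
    let result := PySem.List.pyGetD rev 0 []
    (PySem.List.pyRange 1 (arrays_list.length : Int) 1).foldl
      (fun result i =>
        (PySem.List.pyGetD rev i []).foldl
          (fun result rally =>
            if !(result.any fun condition => rally.all fun item => condition.contains item)
            then result ++ [rally] else result)
          result)
      result

-- ===== PORT B =====
-- postings.setdefault(item, set()).add(n) for each item of cond
def addPost (post : PySem.Dict Int (PySem.Set Int)) (n : Int) (cond : List Int) : PySem.Dict Int (PySem.Set Int) :=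
  cond.foldl (fun d item => d.modify item [] (fun s => PySem.Set.add s n)) post

-- the loop over rally[1:] in _covered (checks emptiness before each intersection, like the Python)
def coveredGo (post : PySem.Dict Int (PySem.Set Int)) : PySem.Set Int → List Int → Bool
  | ids, [] => !ids.isEmpty
  | ids, y :: ys =>
      if ids.isEmpty then false
      else coveredGo post (PySem.Set.inter ids (post.getD y [])) ys

-- _covered(rally, postings, n)
def covered (post : PySem.Dict Int (PySem.Set Int)) (n : Int) (rally : List Int) : Bool :=
  match rally with
  | [] => decide (0 < n)
  | x :: rest => coveredGo post (post.getD x []) rest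

def filter_rally_alt (arrays_list : List (List (List Int))) : List (List Int) :=
  if arrays_list = [] then []
  else
    let result := PySem.List.pyGetD arrays_list (-1) []
    let st0 : PySem.Dict Int (PySem.Set Int) × Int :=
      result.foldl (fun st cond => (addPost st.1 st.2 cond, st.2 + 1)) (PySem.Dict.empty, 0)
    let final :=
      ((PySem.List.slice arrays_list none (some (-1))).reverse).foldl
        (fun (st : List (List Int) × PySem.Dict Int (PySem.Set Int) × Int) group =>
          group.foldl
            (fun st rally =>
              if !(covered st.2.1 st.2.2 rally)
              then (st.1 ++ [rally], addPost st.2.1 st.2.2 rally, st.2.2 + 1)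
              else st)
            st)
        (result, st0.1, st0.2)
    final.1

-- ===== PRECONDITION & SPEC =====
def Spec_filter_rally (arrays_list : List (List (List Int))) (out : List (List Int)) : Prop := out = filter_rally_alt arrays_list
instance (arrays_list : List (List (List Int))) (out : List (List Int)) : Decidable (Spec_filter_rally arrays_list out) := by unfold Spec_filter_rally; infer_instance

-- ===== CLAIM (what is proved, stated in full; the proofs are below) =====
def Claim_equal_filter_rally : Prop := ∀ (arrays_list : List (List (List Int))), Dom_filter_rally arrays_list → Spec_filter_rally arrays_list (filter_rally arrays_list)

-- ===== LEMMAS AND PROOFS =====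

-- invariant: the postings dict indexes exactly the accepted rallies
def PostInv (result : List (List Int)) (post : PySem.Dict Int (PySem.Set Int)) : Prop :=
  ∀ (item i : Int), i ∈ post.getD item [] ↔ ∃ k : Nat, i = (k : Int) ∧ ∃ h : k < result.length, item ∈ result[k]

theorem mem_addPost (cond : List Int) (d : PySem.Dict Int (PySem.Set Int)) (n item i : Int) :
    i ∈ (addPost d n cond).getD item [] ↔ i ∈ d.getD item [] ∨ (i = n ∧ item ∈ cond) := by
  induction cond generalizing d with
  | nil => simp [addPost]
  | cons a cs ih =>
    simp only [addPost, List.foldl_cons] at *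
    rw [ih, PySem.Dict.getD_modify]
    by_cases hia : item = a
    · subst hia; simp [PySem.Set.mem_add]; try tauto
    · simp [hia]; try tauto

theorem postInv_addPost (result : List (List Int)) (post : PySem.Dict Int (PySem.Set Int)) (rally : List Int)
    (h : PostInv result post) :
    PostInv (result ++ [rally]) (addPost post (result.length : Int) rally) := by
  intro item i
  rw [mem_addPost, h item i]
  constructor
  · rintro (⟨k, rfl, hk, hm⟩ | ⟨rfl, hm⟩)
    · exact ⟨k, rfl, by simp; omega, by rw [List.getElem_append_left hk]; exact hm⟩
    · exact ⟨result.length, rfl, by simp, by simpa using hm⟩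
  · rintro ⟨k, rfl, hk, hm⟩
    simp at hk
    rcases Nat.lt_or_ge k result.length with hlt | hge
    · left; exact ⟨k, rfl, hlt, by rwa [List.getElem_append_left hlt] at hm⟩
    · right
      have hk' : k = result.length := by omega
      subst hk'
      refine ⟨rfl, ?_⟩
      simpa using hm

theorem coveredGo_iff (post : PySem.Dict Int (PySem.Set Int)) (rest : List Int) (ids : PySem.Set Int) :
    coveredGo post ids rest = true ↔ ∃ i, i ∈ ids ∧ ∀ y ∈ rest, i ∈ post.getD y [] := by
  induction rest generalizing ids with
  | nil => cases ids <;> simp [coveredGo]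
  | cons y ys ih =>
    by_cases hids : ids.isEmpty
    · rw [List.isEmpty_iff] at hids
      subst hids
      simp [coveredGo]
    · simp only [coveredGo, hids, if_neg Bool.false_ne_true, ih]
      simp only [PySem.Set.mem_inter, List.forall_mem_cons]
      tauto

theorem covered_eq (result : List (List Int)) (post : PySem.Dict Int (PySem.Set Int)) (rally : List Int)
    (h : PostInv result post) :
    covered post (result.length : Int) rally
      = result.any (fun condition => rally.all fun item => condition.contains item) := by
  cases rally with
  | nil => cases result <;> simp [covered]
  | cons x rest =>
    simp only [covered]
    apply Bool.eq_iff_iff.2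
    rw [coveredGo_iff]
    simp only [List.any_eq_true, List.all_eq_true, List.contains_iff_mem]
    constructor
    · rintro ⟨i, hx, hrest⟩
      rcases (h x i).1 hx with ⟨k, rfl, hk, hxk⟩
      refine ⟨result[k], List.getElem_mem hk, ?_⟩
      intro item hitem
      rcases List.mem_cons.1 hitem with rfl | hmem
      · exact hxk
      · rcases (h item k).1 (hrest item hmem) with ⟨k', hkk, hk', hm⟩
        have hkk' : k' = k := by exact_mod_cast hkk.symm
        subst hkk'
        exact hm
    · rintro ⟨c, hc, hall⟩
      rcases List.mem_iff_getElem.1 hc with ⟨k, hk, rfl⟩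
      refine ⟨(k : Int), ?_, ?_⟩
      · exact (h x k).2 ⟨k, rfl, hk, hall x (by simp)⟩
      · intro y hy
        exact (h y k).2 ⟨k, rfl, hk, hall y (List.mem_cons_of_mem _ hy)⟩

theorem foldl_addPost_inv (cs left : List (List Int)) (d : PySem.Dict Int (PySem.Set Int)) (h : PostInv left d) :
    PostInv (left ++ cs) (cs.foldl (fun st cond => (addPost st.1 st.2 cond, st.2 + 1)) (d, (left.length : Int))).1
    ∧ (cs.foldl (fun st cond => (addPost st.1 st.2 cond, st.2 + 1)) (d, (left.length : Int))).2 = ((left ++ cs).length : Int) := by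
  induction cs generalizing left d with
  | nil => exact ⟨by simpa using h, by simp⟩
  | cons c cs ih =>
    simp only [List.foldl_cons]
    have h2 : PostInv (left ++ [c]) (addPost d (left.length : Int) c) := postInv_addPost left d c h
    have hlen : ((left.length : Int) + 1) = (((left ++ [c]).length : Int)) := by simp
    rw [hlen]
    have h3 := ih (left ++ [c]) (addPost d (left.length : Int) c) h2
    simpa [List.append_assoc] using h3

theorem postInv_empty : PostInv [] PySem.Dict.empty := by
  intro item i
  simp [PySem.Dict.getD_empty]

-- one group: the two inner loops agree and the invariant is preserved
theorem inner_fold (rallies : List (List Int)) (st : List (List Int) × PySem.Dict Int (PySem.Set Int) × Int)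
    (h : PostInv st.1 st.2.1) (hn : st.2.2 = (st.1.length : Int)) :
    (rallies.foldl
        (fun st rally =>
          if !(covered st.2.1 st.2.2 rally)
          then (st.1 ++ [rally], addPost st.2.1 st.2.2 rally, st.2.2 + 1)
          else st) st).1
      = rallies.foldl
          (fun result rally =>
            if !(result.any fun condition => rally.all fun item => condition.contains item)
            then result ++ [rally] else result) st.1
    ∧ PostInv (rallies.foldl
        (fun st rally =>
          if !(covered st.2.1 st.2.2 rally)
          then (st.1 ++ [rally], addPost st.2.1 st.2.2 rally, st.2.2 + 1)
          else st) st).1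
        (rallies.foldl
        (fun st rally =>
          if !(covered st.2.1 st.2.2 rally)
          then (st.1 ++ [rally], addPost st.2.1 st.2.2 rally, st.2.2 + 1)
          else st) st).2.1
    ∧ (rallies.foldl
        (fun st rally =>
          if !(covered st.2.1 st.2.2 rally)
          then (st.1 ++ [rally], addPost st.2.1 st.2.2 rally, st.2.2 + 1)
          else st) st).2.2
      = ((rallies.foldl
        (fun st rally =>
          if !(covered st.2.1 st.2.2 rally)
          then (st.1 ++ [rally], addPost st.2.1 st.2.2 rally, st.2.2 + 1)
          else st) st).1.length : Int) := by
  induction rallies generalizing st with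
  | nil => exact ⟨rfl, h, hn⟩
  | cons r rs ih =>
    simp only [List.foldl_cons]
    have hcv : (st.1.any fun condition => r.all fun item => condition.contains item)
        = covered st.2.1 st.2.2 r := by
      rw [hn]; exact (covered_eq st.1 st.2.1 r h).symm
    rw [hcv]
    by_cases hc : covered st.2.1 st.2.2 r = true
    · rw [hc]
      simp only [Bool.not_true, Bool.false_eq_true, if_false]
      exact ih st h hn
    · have hc' : covered st.2.1 st.2.2 r = false := by simpa using hc
      rw [hc']
      simp only [Bool.not_false, if_true]
      refine ih (st.1 ++ [r], addPost st.2.1 st.2.2 r, st.2.2 + 1) ?_ ?_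
      · rw [hn]; exact postInv_addPost _ _ _ h
      · simp [hn]

theorem outer_fold (gs : List (List (List Int))) (st : List (List Int) × PySem.Dict Int (PySem.Set Int) × Int)
    (h : PostInv st.1 st.2.1) (hn : st.2.2 = (st.1.length : Int)) :
    (gs.foldl
        (fun st group =>
          group.foldl
            (fun st rally =>
              if !(covered st.2.1 st.2.2 rally)
              then (st.1 ++ [rally], addPost st.2.1 st.2.2 rally, st.2.2 + 1)
              else st) st) st).1
      = gs.foldl
          (fun result group =>
            group.foldl
              (fun result rally =>
                if !(result.any fun condition => rally.all fun item => condition.contains item)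
                then result ++ [rally] else result) result) st.1 := by
  induction gs generalizing st with
  | nil => rfl
  | cons g gs ih =>
    simp only [List.foldl_cons]
    obtain ⟨heq, h2, h3⟩ := inner_fold g st h hn
    rw [ih _ h2 h3, heq]

-- ===== VERDICT (by name: the statement is the Claim_ definition above) =====
theorem filter_rally_spec : Claim_equal_filter_rally := by
  intro al _
  unfold Spec_filter_rally
  by_cases hal : al = []
  · simp [hal, filter_rally, filter_rally_alt]
  · cases hrev : al.reverse with
    | nil => exact absurd (List.reverse_eq_nil_iff.1 hrev) hal
    | cons r0 rtl =>
      have hlastD : PySem.List.pyGetD al (-1) ([] : List (List Int)) = r0 := by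
        rw [PySem.List.pyGetD_neg_one _ _ hal, List.getLast_eq_head_reverse]
        simp [hrev]
      have hheadD : PySem.List.pyGetD al.reverse 0 ([] : List (List Int)) = r0 := by
        rw [hrev, PySem.List.pyGetD_zero_cons]
      have hgroups : (PySem.List.slice al none (some (-1))).reverse = rtl := by
        rw [PySem.List.slice_to_neg_one, ← List.tail_reverse, hrev, List.tail_cons]
      simp only [filter_rally, filter_rally_alt, if_neg hal]
      rw [hlastD, hheadD, hgroups]
      have hlen : (al.length : Int) = (al.reverse.length : Int) := by simp
      rw [hlen, PySem.List.foldl_pyRange_pyGetD' al.reverse ([] : List (List Int)) _ _ (by norm_num)]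
      rw [hrev]
      simp only [Int.toNat_one, List.drop_one, List.tail_cons]
      obtain ⟨hinv, hn⟩ := foldl_addPost_inv r0 [] PySem.Dict.empty postInv_empty
      simp only [List.nil_append] at hinv hn
      exact (outer_fold rtl (r0, _, _) hinv hn).symm
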